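-- pv_equiv track=rewrite | github.com/ericmerle3789/Collatz-Junction-Theorem | scripts/tools/session10f2_structural_argument.py | compute_image
-- ===== SOURCE A (Python) =====
-- from itertools import combinations_with_replacement
-- from collections import defaultdict
--
-- def compute_image(k, p, u, M):
--     """Calcule Im(f) pour B non-décroissant dans [0,M]^{k-1}."""
--     image = set()
--     # Aussi tracker les B qui atteignent chaque résidu
--     residue_Bs = defaultdict(list)
--
--     for B in combinations_with_replacement(range(M + 1), k - 1):
--         val = 0
--         for j in range(k - 1):
--             val = (val + pow(u, j + 1, p) * pow(2, B[j], p)) % p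
--         image.add(val)
--         residue_Bs[val].append(B)
--
--     return image, residue_Bs
-- ===== SOURCE B (Python) =====
-- from collections import defaultdict
--
-- def compute_image(k, p, u, M):
--     """Calcule Im(f) pour B non-decroissant dans [0,M]^{k-1}.
--
--     DP niveau par niveau: etend les prefixes d'une position a la fois, en
--     accumulant le residu modulaire au fil des positions; les prefixes sont
--     partages en liste chainee (parent, chiffre) et materialises a la feuille."""
--     if k < 1:
--         raise ValueError("k must be >= 1")
--     image = set()
--     residue_Bs = defaultdict(list)
--     # (residu accumule, chemin en liste chainee, borne inferieure du prochain chiffre)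
--     states = [(0, None, 0)]
--     for pos in range(k - 1):
--         if not states:
--             break
--         states = [((val + pow(u, pos + 1, p) * pow(2, d, p)) % p, (path, d), d)
--                   for (val, path, lo) in states
--                   for d in range(lo, M + 1)]
--     for val, path, _ in states:
--         digits = []
--         while path is not None:
--             path, d = path
--             digits.append(d)
--         digits.reverse()
--         image.add(val)
--         residue_Bs[val].append(tuple(digits))
--     return image, residue_Bs
-- ===== Notes on version B (the rewrite author's own statement) =====
-- stated objective: alternative
-- what changed: Replaces the itertools.combinations_with_replacement loop that re-walks every tuple to compute its residue by an iterative level-by-level DP over the k-1 positions that extends all prefixes one digit at a time, threading the running modular residue as an accumulator and sharing prefixes as linked lists materialised at the leaf.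
import Mathlib
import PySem

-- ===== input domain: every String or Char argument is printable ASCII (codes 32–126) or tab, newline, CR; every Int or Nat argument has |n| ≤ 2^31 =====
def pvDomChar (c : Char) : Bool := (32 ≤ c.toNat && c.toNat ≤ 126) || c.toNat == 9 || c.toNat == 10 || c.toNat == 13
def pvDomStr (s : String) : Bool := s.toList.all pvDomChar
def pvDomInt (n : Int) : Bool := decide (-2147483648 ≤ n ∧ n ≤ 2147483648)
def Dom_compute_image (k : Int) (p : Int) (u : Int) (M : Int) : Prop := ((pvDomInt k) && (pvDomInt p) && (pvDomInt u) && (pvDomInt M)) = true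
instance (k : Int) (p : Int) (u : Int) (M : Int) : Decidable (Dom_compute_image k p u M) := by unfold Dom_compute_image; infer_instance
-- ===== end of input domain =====

-- B replaces the itertools.combinations_with_replacement scan (which re-walks each tuple to
-- compute its residue) by an iterative level-by-level DP over the k-1 positions that extends
-- all prefixes one position at a time, threading the running modular residue as an
-- accumulator and sharing prefixes as linked lists materialised at the leaf;
-- objective: alternative decomposition, same results.

-- ===== PORT A =====
-- combinations_with_replacement(range(M+1), r), in itertools' lexicographic order:
-- all non-decreasing r-tuples over lo..M (library call ported as its specification).
def cwr (M : Int) : Nat → Int → List (List Int)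
  | 0, _ => [[]]
  | r + 1, lo => (PySem.List.pyRange lo (M + 1) 1).flatMap (fun d => (cwr M r d).map (d :: ·))

-- Literal port of A.  (k-1).toNat is exact for the admitted k ≥ 1; the .toNat on the powMod
-- exponents is exact since j ≥ 0 comes from range and B[j] ≥ 0 is a digit of range(M+1).
def compute_image (k : Int) (p : Int) (u : Int) (M : Int) : List Int × (List (Int × List (List Int))) :=
  let st :=
    (cwr M (k - 1).toNat 0).foldl
      (fun (st : PySem.Set Int × PySem.Dict Int (List (List Int))) B =>
        let val := (PySem.List.pyRange 0 (k - 1) 1).foldl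
          (fun v j =>
            PySem.Int.mod
              (v + PySem.Int.powMod u (j + 1).toNat p *
                   PySem.Int.powMod 2 (PySem.List.pyGetD B j 0).toNat p) p) 0
        (PySem.Set.add st.1 val, PySem.Dict.modify st.2 val [] (· ++ [B])))
      (PySem.Set.empty, PySem.Dict.empty)
  (st.1, st.2.items)

-- ===== PORT B =====
-- One level of the DP: extend every state (residue, chained prefix, lower bound) by each
-- next digit; Source B's chained pair (path, d) is the cons cell d :: path (digit first).
-- The leading 'if' transcribes Source B's 'break' (an empty level stays empty).
def levelStep (p : Int) (u : Int) (M : Int)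
    (states : List (Int × List Int × Int)) (pos : Int) : List (Int × List Int × Int) :=
  if states = [] then []
  else states.flatMap (fun s =>
    (PySem.List.pyRange s.2.2 (M + 1) 1).map (fun d =>
      (PySem.Int.mod (s.1 + PySem.Int.powMod u (pos + 1).toNat p *
                            PySem.Int.powMod 2 d.toNat p) p,
       d :: s.2.1, d)))

-- Literal port of Source B ((pos+1).toNat / d.toNat are exact: pos ≥ 0 from range, d ≥ 0 a digit).
-- On k < 1 Source B raises ValueError (as A does); the else branch is a dummy outside Pre_.
def compute_image_alt (k : Int) (p : Int) (u : Int) (M : Int) : List Int × (List (Int × List (List Int))) :=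
  if 1 ≤ k then
    let states := (PySem.List.pyRange 0 (k - 1) 1).foldl (levelStep p u M) [(0, [], 0)]
    let st := states.foldl
      (fun (st : PySem.Set Int × PySem.Dict Int (List (List Int))) s =>
        (PySem.Set.add st.1 s.1, PySem.Dict.modify st.2 s.1 (([] : List (List Int))) (· ++ [s.2.1.reverse])))
      (PySem.Set.empty, PySem.Dict.empty)
    (st.1, st.2.items)
  else ([], [])

-- ===== PRECONDITION & SPEC =====
-- Pre_ excludes exactly the inputs where Python raises (both A and B): k ≤ 0 (A's
-- combinations_with_replacement rejects a negative r, B raises ValueError) and p = 0 when the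
-- inner pow(…, …, p) is actually executed, i.e. when k ≥ 2 and at least one tuple exists (M ≥ 0).
def Pre_compute_image (k : Int) (p : Int) (u : Int) (M : Int) : Prop :=
  1 ≤ k ∧ (p ≠ 0 ∨ k = 1 ∨ M < 0)
instance (k : Int) (p : Int) (u : Int) (M : Int) : Decidable (Pre_compute_image k p u M) := by
  unfold Pre_compute_image; infer_instance

def pvWitness_compute_image : Int × Int × Int × Int := (3, 7, 3, 2)

def Spec_compute_image (k : Int) (p : Int) (u : Int) (M : Int) (out : List Int × (List (Int × List (List Int)))) : Prop := out = compute_image_alt k p u M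
instance (k : Int) (p : Int) (u : Int) (M : Int) (out : List Int × (List (Int × List (List Int)))) : Decidable (Spec_compute_image k p u M out) := by unfold Spec_compute_image; infer_instance

-- ===== CLAIM (what is proved, stated in full; the proofs are below) =====
def Claim_equal_compute_image : Prop := ∀ (k : Int) (p : Int) (u : Int) (M : Int), Dom_compute_image k p u M → Pre_compute_image k p u M → Spec_compute_image k p u M (compute_image k p u M)

-- ===== LEMMAS AND PROOFS =====

-- The residue B accumulates along a path: starting value v at depth pos, extended by digits ds.
def valFrom (p : Int) (u : Int) : Int → Int → List Int → Int
  | v, _pos, [] => v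
  | v, pos, d :: ds =>
      valFrom p u
        (PySem.Int.mod
          (v + PySem.Int.powMod u (pos + 1).toNat p * PySem.Int.powMod 2 d.toNat p) p)
        (pos + 1) ds

theorem length_of_mem_cwr (M : Int) : ∀ (r : Nat) (lo : Int) (t : List Int),
    t ∈ cwr M r lo → t.length = r := by
  intro r
  induction r with
  | zero => intro lo t ht; simp [cwr] at ht; simp [ht]
  | succ r ih =>
    intro lo t ht
    simp only [cwr, List.mem_flatMap, List.mem_map] at ht
    obtain ⟨d, -, t', ht', rfl⟩ := ht
    simp [ih d t' ht']

-- A's inner index loop over a tuple pre ++ t, already past pre, equals valFrom.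
theorem innerA_eq (p u : Int) : ∀ (t : List Int) (pre : List Int) (v : Int),
    (PySem.List.pyRange (pre.length : Int) ((pre.length : Int) + t.length) 1).foldl
      (fun v j =>
        PySem.Int.mod
          (v + PySem.Int.powMod u (j + 1).toNat p *
               PySem.Int.powMod 2 (PySem.List.pyGetD (pre ++ t) j 0).toNat p) p) v
      = valFrom p u v (pre.length : Int) t := by
  intro t
  induction t with
  | nil => intro pre v; simp [PySem.List.pyRange_one_eq_nil, valFrom]
  | cons d ds ih =>
    intro pre v
    rw [PySem.List.pyRange_one_cons
      (by have : (0:Int) < ((d :: ds).length : Int) := by exact_mod_cast Nat.succ_pos ds.length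
          omega)]
    have hget : PySem.List.pyGetD (pre ++ d :: ds) (pre.length : Int) 0 = d := by
      rw [PySem.List.pyGetD_natCast, List.getD, List.getElem?_append_right (Nat.le_refl _)]
      simp
    simp only [List.foldl_cons, hget, valFrom]
    have := ih (pre ++ [d]) (PySem.Int.mod (v + PySem.Int.powMod u ((pre.length : Int) + 1).toNat p * PySem.Int.powMod 2 d.toNat p) p)
    simp only [List.append_assoc, List.singleton_append, List.length_append, List.length_cons,
      Nat.cast_add, Nat.cast_one] at this ⊢
    rw [show (pre.length : Int) + ((ds.length : Int) + 1) = (pre.length : Int) + 1 + (ds.length : Int) by ring]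
    exact this

-- B's DP loop, run for the r levels pos0 … pos0+r-1, expands every state by all
-- non-decreasing suffixes cwr enumerates, with the residue accumulated by valFrom.
theorem levels_eq (p u M : Int) : ∀ (r : Nat) (pos0 : Int) (sts : List (Int × List Int × Int)),
    (PySem.List.pyRange pos0 (pos0 + r) 1).foldl (levelStep p u M) sts
      = sts.flatMap (fun s => (cwr M r s.2.2).map
          (fun t => (valFrom p u s.1 pos0 t, t.reverse ++ s.2.1, t.getLastD s.2.2))) := by
  intro r
  induction r with
  | zero =>
    intro pos0 sts
    simp [PySem.List.pyRange_one_eq_nil, cwr, valFrom]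
  | succ r ih =>
    intro pos0 sts
    have hlt : pos0 < pos0 + ((r + 1 : Nat) : Int) := by push_cast; omega
    rw [PySem.List.pyRange_one_cons hlt, List.foldl_cons]
    have hstep : levelStep p u M sts pos0 = sts.flatMap (fun s =>
        (PySem.List.pyRange s.2.2 (M + 1) 1).map (fun d =>
          (PySem.Int.mod (s.1 + PySem.Int.powMod u (pos0 + 1).toNat p *
                                PySem.Int.powMod 2 d.toNat p) p, d :: s.2.1, d))) := by
      by_cases h : sts = [] <;> simp [levelStep, h]
    have hb : pos0 + ((r + 1 : Nat) : Int) = (pos0 + 1) + (r : Int) := by push_cast; ring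
    rw [hstep, hb, ih (pos0 + 1)]
    rw [List.flatMap_assoc]
    refine List.flatMap_congr ?_
    intro s _
    simp only [cwr, List.map_flatMap, List.flatMap_map, List.map_map]
    refine List.flatMap_congr ?_
    intro d _
    refine List.map_congr_left ?_
    intro t _
    simp [valFrom, List.append_assoc, List.reverse_cons, ← List.getLastD_eq_getLast?, List.getLastD_cons]

-- ===== VERDICT (by name: the statement is the Claim_ definition above) =====
theorem compute_image_spec : Claim_equal_compute_image := by
  intro k p u M _hDom hPre
  obtain ⟨hk, -⟩ := hPre
  unfold Spec_compute_image compute_image compute_image_alt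
  rw [if_pos hk]
  have hr : ((k - 1).toNat : Int) = k - 1 := Int.toNat_of_nonneg (by omega)
  have hst : (PySem.List.pyRange 0 (k - 1) 1).foldl (levelStep p u M) [(0, [], 0)]
      = (cwr M (k - 1).toNat 0).map (fun t => (valFrom p u 0 0 t, t.reverse, t.getLastD 0)) := by
    have := levels_eq p u M (k - 1).toNat 0 [(0, [], 0)]
    simp only [zero_add, hr] at this
    simpa using this
  rw [hst]
  simp only [List.foldl_map]
  refine congrArg (fun st : PySem.Set Int × PySem.Dict Int (List (List Int)) => (st.1, st.2.items)) ?_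
  refine PySem.List.foldl_congr_mem _ _ _ _ ?_
  intro st t ht
  have hlen := length_of_mem_cwr M _ _ _ ht
  have := innerA_eq p u t [] 0
  simp only [List.nil_append, List.length_nil, Nat.cast_zero, zero_add] at this
  simp only [hlen, ← this, hr, List.reverse_reverse]
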